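-- pv_equiv track=rewrite | github.com/roccoemmerichh/TP-Programacion1 | reservas.py | buscar_pos
-- ===== SOURCE A (Python) =====
-- butacas_visuales = [
--     [("A1","A2","A3","A4","A5","A6","A7","A8")],
--     [("B1","B2","B3","B4","B5","B6","B7","B8")],
--     [("C1","C2","C3","C4","C5","C6","C7","C8")],
--     [("D1","D2","D3","D4","D5","D6","D7","D8")],
--     [("E1","E2","E3","E4","E5","E6","E7","E8")],
--     [("F1","F2","F3","F4","F5","F6","F7","F8")],
--     [("G1","G2","G3","G4","G5","G6","G7","G8")],
--     [("H1","H2","H3","H4","H5","H6","H7","H8")],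
-- ]
--
-- def buscar_pos(butaca):
--     pos = None
--     f = 0
--     while f < len(butacas_visuales) and pos is None:
--         fila_tupla = butacas_visuales[f][0]
--         c = 0
--         while c < len(fila_tupla) and pos is None:
--             if fila_tupla[c] == butaca:
--                 pos = (f, c)
--             c += 1
--         f += 1
--     return pos
-- ===== SOURCE B (Python) =====
-- def buscar_pos(butaca):
--     # Closed-form decode: each label is letter+digit, so row/col
--     # follow directly from the two character codes; no scanning at all.
--     if isinstance(butaca, str) and len(butaca) == 2:
--         f = ord(butaca[0]) - ord('A')
--         c = ord(butaca[1]) - ord('1')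
--         if 0 <= f < 8 and 0 <= c < 8:
--             return (f, c)
--     return None
-- ===== Notes on version B (the rewrite author's own statement) =====
-- stated objective: simpler
-- what changed: Replaces the nested while-loop scan over the fixed 8x8 label grid with a closed-form arithmetic decode of the label's two character codes into row and column.
import Mathlib
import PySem

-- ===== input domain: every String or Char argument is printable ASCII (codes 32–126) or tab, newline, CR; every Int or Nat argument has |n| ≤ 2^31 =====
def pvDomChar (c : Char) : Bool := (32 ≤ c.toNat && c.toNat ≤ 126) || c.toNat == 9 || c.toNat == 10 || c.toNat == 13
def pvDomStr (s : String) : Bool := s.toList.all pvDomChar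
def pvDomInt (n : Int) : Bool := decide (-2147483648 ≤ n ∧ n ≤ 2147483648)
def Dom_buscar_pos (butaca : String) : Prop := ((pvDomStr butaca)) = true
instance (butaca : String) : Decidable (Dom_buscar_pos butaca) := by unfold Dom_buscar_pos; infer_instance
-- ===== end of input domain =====

-- B replaces A's nested scan of the fixed 8x8 label grid by a closed-form
-- arithmetic decode of the label's two character codes (objective: simpler).

-- ===== PORT A =====
-- the module-level grid: each row is a one-element list holding the tuple of 8 labels
def butacas_visuales : List (List (List String)) := [
  [["A1","A2","A3","A4","A5","A6","A7","A8"]],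
  [["B1","B2","B3","B4","B5","B6","B7","B8"]],
  [["C1","C2","C3","C4","C5","C6","C7","C8"]],
  [["D1","D2","D3","D4","D5","D6","D7","D8"]],
  [["E1","E2","E3","E4","E5","E6","E7","E8"]],
  [["F1","F2","F3","F4","F5","F6","F7","F8"]],
  [["G1","G2","G3","G4","G5","G6","G7","G8"]],
  [["H1","H2","H3","H4","H5","H6","H7","H8"]]]

-- inner while: scan one row's tuple, c counts the column; early exit on match (pos set)
def buscarFila (butaca : String) (f c : Int) (fila : List String) : Option (Int × Int) :=
  match fila with
  | [] => none
  | x :: rest => if x = butaca then some (f, c) else buscarFila butaca f (c + 1) rest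

-- outer while: f counts the row, fila_tupla = butacas_visuales[f][0]; stop once pos is set
def buscarFilas (butaca : String) (f : Int) (rows : List (List (List String))) : Option (Int × Int) :=
  match rows with
  | [] => none
  | row :: rest =>
    match buscarFila butaca f 0 (row.headD []) with
    | some p => some p
    | none => buscarFilas butaca (f + 1) rest

def buscar_pos (butaca : String) : Option (Int × Int) :=
  buscarFilas butaca 0 butacas_visuales

-- ===== PORT B =====
-- isinstance(butaca, str) is always true under the type convention; len(butaca) == 2
-- and the two indexings become the match on the character list
def buscar_pos_alt (butaca : String) : Option (Int × Int) :=
  match butaca.toList with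
  | [a, b] =>
    let f : Int := (a.toNat : Int) - 65   -- subtracts the letter base code 65
    let c : Int := (b.toNat : Int) - 49   -- subtracts the digit base code 49
    if 0 ≤ f ∧ f < 8 ∧ 0 ≤ c ∧ c < 8 then some (f, c) else none
  | _ => none

-- ===== PRECONDITION & SPEC =====
def Spec_buscar_pos (butaca : String) (out : Option (Int × Int)) : Prop := out = buscar_pos_alt butaca
instance (butaca : String) (out : Option (Int × Int)) : Decidable (Spec_buscar_pos butaca out) := by unfold Spec_buscar_pos; infer_instance

-- ===== CLAIM (what is proved, stated in full; the proofs are below) =====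
def Claim_equal_buscar_pos : Prop := ∀ (butaca : String), Dom_buscar_pos butaca → Spec_buscar_pos butaca (buscar_pos butaca)

-- ===== LEMMAS AND PROOFS =====

theorem buscarFila_none (butaca : String) (f c : Int) (fila : List String)
    (h : butaca ∉ fila) : buscarFila butaca f c fila = none := by
  induction fila generalizing c with
  | nil => rfl
  | cons x rest ih =>
    simp only [List.mem_cons, not_or] at h
    simp only [buscarFila]
    rw [if_neg (fun he => h.1 he.symm)]
    exact ih _ h.2

theorem buscarFilas_none (butaca : String) (f : Int) (rows : List (List (List String)))
    (h : ∀ row ∈ rows, butaca ∉ row.headD []) : buscarFilas butaca f rows = none := by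
  induction rows generalizing f with
  | nil => rfl
  | cons row rest ih =>
    simp only [buscarFilas]
    rw [buscarFila_none _ _ _ _ (h row (List.mem_cons_self ..))]
    exact ih _ (fun r hr => h r (List.mem_cons_of_mem _ hr))

-- every grid label is a letter in the first code range followed by a digit in the second
def seatLike (x : String) : Bool :=
  match x.toList with
  | [p, q] => decide (65 ≤ p.toNat ∧ p.toNat ≤ 72 ∧ 49 ≤ q.toNat ∧ q.toNat ≤ 56)
  | _ => false

theorem grid_seatLike : ∀ row ∈ butacas_visuales, ∀ x ∈ row.headD [], seatLike x = true := by
  decide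

-- ===== VERDICT (by name: the statement is the Claim_ definition above) =====
theorem buscar_pos_spec : Claim_equal_buscar_pos := by
  intro s _
  unfold Spec_buscar_pos
  rcases hcs : s.toList with _ | ⟨a, _ | ⟨b, _ | ⟨c, r⟩⟩⟩
  case nil | cons.nil | cons.cons.cons =>
    have hnone : buscar_pos s = none := by
      unfold buscar_pos
      apply buscarFilas_none
      intro row hrow hmem
      have hx := grid_seatLike row hrow s hmem
      simp [seatLike, hcs] at hx
    simp [buscar_pos_alt, hcs, hnone]
  case cons.cons.nil =>
    by_cases hr : 65 ≤ a.toNat ∧ a.toNat ≤ 72 ∧ 49 ≤ b.toNat ∧ b.toNat ≤ 56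
    · obtain ⟨h1, h2, h3, h4⟩ := hr
      have ha : a.toNat = 65 ∨ a.toNat = 66 ∨ a.toNat = 67 ∨ a.toNat = 68 ∨
          a.toNat = 69 ∨ a.toNat = 70 ∨ a.toNat = 71 ∨ a.toNat = 72 := by omega
      have hb : b.toNat = 49 ∨ b.toNat = 50 ∨ b.toNat = 51 ∨ b.toNat = 52 ∨
          b.toNat = 53 ∨ b.toNat = 54 ∨ b.toNat = 55 ∨ b.toNat = 56 := by omega
      rcases ha with h|h|h|h|h|h|h|h <;> rcases hb with g|g|g|g|g|g|g|g <;>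
        · obtain rfl := (Char.ofNat_toNat a).symm.trans (congrArg Char.ofNat h)
          obtain rfl := (Char.ofNat_toNat b).symm.trans (congrArg Char.ofNat g)
          obtain rfl := (congrArg String.ofList hcs).symm.trans String.ofList_toList
          decide
    · have hnone : buscar_pos s = none := by
        unfold buscar_pos
        apply buscarFilas_none
        intro row hrow hmem
        have hx := grid_seatLike row hrow s hmem
        simp [seatLike, hcs] at hx
        exact hr hx
      rw [hnone]
      simp only [buscar_pos_alt, hcs]
      rw [if_neg (by omega)]
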